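-- pv_equiv track=rewrite | github.com/changqingla/Translation_agent | src/core/document_chunker.py | _split_by_separator
-- ===== SOURCE A (Python) =====
-- from typing import List, Dict, Any
--
-- def _split_by_separator(content: str, separator: str) -> List[str]:
--     """按分隔符分割文档"""
--     if separator.startswith('\n#'):
--         # 处理标题分隔符
--         parts = content.split(separator)
--         chunks = []
--         for i, part in enumerate(parts):
--             if i == 0:
--                 chunks.append(part)
--             else:
--                 chunks.append(separator + part)
--         return [chunk.strip() for chunk in chunks if chunk.strip()]
--     else:
--         # 处理其他分隔符
--         return [chunk.strip() for chunk in content.split(separator) if chunk.strip()]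
-- ===== SOURCE B (Python) =====
-- def _split_by_separator(content: str, separator: str):
--     """Staged: index all separator occurrences first, greedily select the
--     non-overlapping ones, then slice between boundary pairs and strip/filter."""
--     if not separator:
--         raise ValueError("empty separator")
--     L = len(separator)
--     # stage 1: every position where the separator matches (may overlap)
--     cand = [i for i in range(len(content) - L + 1) if content.startswith(separator, i)]
--     # stage 2: greedy left-to-right selection of non-overlapping matches
--     cuts = []
--     last = 0
--     for p in cand:
--         if p >= last:
--             cuts.append(p)
--             last = p + L
--     # stage 3: boundary pairs; a header separator stays attached to its chunk
--     keep = L if separator.startswith('\n#') else 0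
--     starts = [0] + [p + L - keep for p in cuts]
--     ends = cuts + [len(content)]
--     pieces = (content[a:b].strip() for a, b in zip(starts, ends))
--     return [p for p in pieces if p]
-- ===== Notes on version B (the rewrite author's own statement) =====
-- stated objective: alternative
-- what changed: A calls str.split and then fixes up the parts in an enumerate loop before a strip-filter; B never splits: it first builds an index of all separator match positions, greedily selects the non-overlapping ones, derives start/end boundary pairs (keeping a header separator inside its slice instead of re-prepending it), and slices the content between consecutive boundaries before strip/filter.
import Mathlib
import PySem

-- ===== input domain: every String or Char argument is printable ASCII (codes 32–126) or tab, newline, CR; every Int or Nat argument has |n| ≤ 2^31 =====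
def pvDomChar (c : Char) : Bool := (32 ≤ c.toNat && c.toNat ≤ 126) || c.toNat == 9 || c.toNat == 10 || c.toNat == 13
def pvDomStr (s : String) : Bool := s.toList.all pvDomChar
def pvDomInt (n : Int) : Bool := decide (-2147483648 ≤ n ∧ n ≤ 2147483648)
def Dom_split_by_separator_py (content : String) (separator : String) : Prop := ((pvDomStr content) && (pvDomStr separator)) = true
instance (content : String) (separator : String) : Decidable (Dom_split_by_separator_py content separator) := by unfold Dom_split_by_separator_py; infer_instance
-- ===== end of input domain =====

-- B replaces A's split/enumerate/filter pipeline by a staged computation: index all separator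
-- match positions, greedily select the non-overlapping ones, then slice the content between
-- consecutive boundary pairs (a header separator stays inside its slice) (objective: alternative).

-- ===== PORT A =====
-- char-level transliteration of A; the String wrapper maps back at the end
def pvAChars (content : List Char) (sep : List Char) : List (List Char) :=
  if PySem.Chars.startswith sep ['\n', '#'] then
    match PySem.Chars.split? content sep with
    | none => []  -- ValueError from content.split(''): excluded by Pre_
    | some parts =>
      let chunks := (PySem.List.enumerate parts).foldl
        (fun acc ip => acc ++ [if ip.1 = 0 then ip.2 else sep ++ ip.2]) []
      (chunks.filter (fun c => PySem.Chars.strip c ≠ [])).map PySem.Chars.strip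
  else
    match PySem.Chars.split? content sep with
    | none => []  -- ValueError: excluded by Pre_
    | some parts =>
      (parts.filter (fun c => PySem.Chars.strip c ≠ [])).map PySem.Chars.strip

def split_by_separator_py (content : String) (separator : String) : List String :=
  (pvAChars content.toList separator.toList).map String.ofList

-- ===== PORT B =====
-- staged transliteration of Source B: cand (all match positions), cuts (greedy non-overlapping
-- selection via foldl), boundary pairs, slice/strip/filter.
-- content.startswith(separator, i) is ported as startswith on the dropped suffix: exact for 0 ≤ i.
def pvBChars (content : List Char) (sep : List Char) : List (List Char) :=
  if sep = [] then []  -- raise ValueError("empty separator"): excluded by Pre_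
  else
    let L : Int := sep.length
    let n : Int := content.length
    let cand := (PySem.List.pyRange 0 (n - L + 1) 1).filter
      (fun i => PySem.Chars.startswith (content.drop i.toNat) sep)
    let cuts := (cand.foldl (fun st p => if st.1 ≤ p then (p + L, st.2 ++ [p]) else st)
      ((0 : Int), ([] : List Int))).2
    let keep : Int := if PySem.Chars.startswith sep ['\n', '#'] then L else 0
    let starts := (0 : Int) :: cuts.map (fun p => p + L - keep)
    let ends := cuts ++ [n]
    ((starts.zip ends).map
      (fun ab => PySem.Chars.strip (PySem.List.slice content (some ab.1) (some ab.2)))).filter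
      (fun p => p ≠ [])

def split_by_separator_py_alt (content : String) (separator : String) : List String :=
  (pvBChars content.toList separator.toList).map String.ofList

-- ===== PRECONDITION & SPEC =====
-- Pre_ excludes only separator = "", on which Python A raises ValueError (str.split('')) and B raises too.
def Pre_split_by_separator_py (content : String) (separator : String) : Prop := separator ≠ ""
instance (content : String) (separator : String) : Decidable (Pre_split_by_separator_py content separator) := by unfold Pre_split_by_separator_py; infer_instance

def pvWitness_split_by_separator_py : String × String := ("\n# a\nb\n# c ", "\n#")

def Spec_split_by_separator_py (content : String) (separator : String) (out : List String) : Prop := out = split_by_separator_py_alt content separator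
instance (content : String) (separator : String) (out : List String) : Decidable (Spec_split_by_separator_py content separator out) := by unfold Spec_split_by_separator_py; infer_instance

-- ===== CLAIM (what is proved, stated in full; the proofs are below) =====
def Claim_equal_split_by_separator_py : Prop := ∀ (content : String) (separator : String), Dom_split_by_separator_py content separator → Pre_split_by_separator_py content separator → Spec_split_by_separator_py content separator (split_by_separator_py content separator)

-- ===== LEMMAS AND PROOFS =====

-- proof-side recursive characterisation of Python's str.split for a nonempty separator
def pvSplitRec (sep : List Char) : List Char → List (List Char)
  | [] => [[]]
  | c :: rest =>
    if sep.isPrefixOf (c :: rest) then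
      [] :: pvSplitRec sep (List.drop (sep.length - 1) rest)
    else
      match pvSplitRec sep rest with
      | [] => []
      | h :: t => (c :: h) :: t
  termination_by l => l.length
  decreasing_by
    · simp only [List.length_cons]
      have := List.length_drop (l := rest) (i := sep.length - 1)
      omega
    · simp

-- A's per-chunk decoration: every chunk except the very first gets sep prepended when header
def pvDeco (sep : List Char) (header : Bool) : Bool → List (List Char) → List (List Char)
  | _, [] => []
  | first, h :: t => (if !first && header then sep ++ h else h) :: pvDeco sep header false t

-- B proof-side: candidate positions, greedy selection, boundary slices
def pvCand (sep l : List Char) : List Nat :=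
  (List.range (l.length + 1)).filter (fun i => sep.isPrefixOf (l.drop i))

def pvGreedy (L : Nat) : List Nat → Nat → List Nat
  | [], _ => []
  | p :: ps, t => if t ≤ p then p :: pvGreedy L ps (p + L) else pvGreedy L ps t

def pvChunks (L : Nat) (l : List Char) (cuts : List Nat) : List (List Char) :=
  ((0 :: cuts.map (· + L)).zip (cuts ++ [l.length])).map
    (fun ab => (l.drop ab.1).take (ab.2 - ab.1))

theorem pvSplitRec_ne_nil (sep l : List Char) : pvSplitRec sep l ≠ [] := by
  induction l using pvSplitRec.induct sep with
  | case1 => simp [pvSplitRec]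
  | case2 c rest h ih => simp [pvSplitRec, h]
  | case3 c rest h hnil ih => exact absurd hnil ih
  | case4 c rest hp h t hht ih =>
    rw [pvSplitRec]
    simp [hp, hht]

theorem pv_splitOn_go (sep : List Char) (hsep : sep ≠ []) :
    ∀ (fuel : Nat) (l : List Char), l.length < fuel → ∀ (cur : List Char) (acc : List (List Char)),
      PySem.Chars.splitOn.go sep fuel l cur acc =
        acc.reverse ++ (match pvSplitRec sep l with
          | [] => []
          | h :: t => (cur.reverse ++ h) :: t) := by
  intro fuel
  induction fuel with
  | zero => intro l hl; omega
  | succ n ih =>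
    intro l hl cur acc
    match l with
    | [] =>
      rw [PySem.Chars.splitOn.go]
      · simp [pvSplitRec]
      · omega
    | c :: rest =>
      rw [PySem.Chars.splitOn.go]
      by_cases hpre : sep.isPrefixOf (c :: rest)
      · simp only [hpre, if_true]
        have h1 : 1 ≤ sep.length := by
          cases sep with | nil => exact absurd rfl hsep | cons a b => simp
        have hlen : (List.drop sep.length (c :: rest)).length < n := by
          simp only [List.length_drop, List.length_cons] at *
          omega
        rw [ih _ hlen [] (cur.reverse :: acc)]
        rw [pvSplitRec]
        simp only [hpre, if_true]
        have hdrop : List.drop sep.length (c :: rest) = List.drop (sep.length - 1) rest := by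
          cases sep with | nil => exact absurd rfl hsep | cons a b => simp
        rw [hdrop]
        cases pvSplitRec sep (List.drop (sep.length - 1) rest) with
        | nil => simp
        | cons h t => simp
      · simp only [hpre, if_false, Bool.false_eq_true]
        have hlen : rest.length < n := by simp at hl; omega
        rw [ih rest hlen (c :: cur) acc]
        rw [pvSplitRec]
        simp only [hpre, if_false, Bool.false_eq_true]
        cases hsr : pvSplitRec sep rest with
        | nil => exact absurd hsr (pvSplitRec_ne_nil sep rest)
        | cons h t => simp

theorem pv_splitOn_eq (sep : List Char) (hsep : sep ≠ []) (l : List Char) :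
    PySem.Chars.splitOn l sep = pvSplitRec sep l := by
  show PySem.Chars.splitOn.go sep (l.length + 1) l [] [] = _
  rw [pv_splitOn_go sep hsep (l.length + 1) l (by omega) [] []]
  cases hsr : pvSplitRec sep l with
  | nil => exact absurd hsr (pvSplitRec_ne_nil sep l)
  | cons h t => simp

theorem pv_enum_map (sep : List Char) : ∀ (xs : List (List Char)) (k : Int), 1 ≤ k →
    (PySem.List.enumerate xs k).map (fun ip => if ip.1 = 0 then ip.2 else sep ++ ip.2) =
      xs.map (fun p => sep ++ p) := by
  intro xs
  induction xs with
  | nil => intro k hk; simp [PySem.List.enumerate]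
  | cons h t ih =>
    intro k hk
    rw [PySem.List.enumerate]
    simp only [List.map_cons]
    rw [if_neg (by omega), ih (k + 1) (by omega)]

theorem pv_deco_header_tail (sep : List Char) : ∀ (xs : List (List Char)),
    pvDeco sep true false xs = xs.map (fun p => sep ++ p) := by
  intro xs
  induction xs with
  | nil => rfl
  | cons h t ih => simp [pvDeco, ih]

-- A's enumerate loop builds exactly the decorated chunk list
theorem pv_chunksA (sep : List Char) (parts : List (List Char)) :
    (PySem.List.enumerate parts).foldl
        (fun acc ip => acc ++ [if ip.1 = 0 then ip.2 else sep ++ ip.2]) [] =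
      pvDeco sep true true parts := by
  rw [PySem.List.foldl_append_singleton_eq_map]
  cases parts with
  | nil => rfl
  | cons h t =>
    rw [PySem.List.enumerate]
    simp only [List.map_cons, List.nil_append, pvDeco]
    rw [pv_enum_map sep t (0 + 1) (by omega), pv_deco_header_tail]
    simp

-- range-filter extension: indices that all fail the predicate can be dropped from the range
theorem pv_filter_range_ext (P : Nat → Bool) (m k : Nat) (hmk : m ≤ k)
    (hf : ∀ i, m ≤ i → i < k → P i = false) :
    (List.range k).filter P = (List.range m).filter P := by
  rw [show k = m + (k - m) by omega, List.range_add, List.filter_append]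
  have h2 : (List.filter P ((List.range (k - m)).map (fun x => m + x))) = [] := by
    rw [List.filter_eq_nil_iff]
    intro a ha
    rcases List.mem_map.1 ha with ⟨i, hi, rfl⟩
    rw [List.mem_range] at hi
    simp [hf (m + i) (by omega) (by omega)]
  rw [h2, List.append_nil]

theorem pv_cand_short (sep l : List Char) (h : l.length < sep.length) : pvCand sep l = [] := by
  unfold pvCand
  rw [List.filter_eq_nil_iff]
  intro i hi
  simp only [Bool.not_eq_true]
  rw [← Bool.not_eq_true]
  intro hp
  have := (List.isPrefixOf_iff_prefix.1 hp).length_le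
  simp [List.length_drop] at this
  omega

theorem pv_cand_cons (sep : List Char) (c : Char) (rest : List Char) :
    pvCand sep (c :: rest) =
      (if sep.isPrefixOf (c :: rest) then [0] else []) ++ (pvCand sep rest).map (· + 1) := by
  unfold pvCand
  rw [show (c :: rest).length + 1 = (rest.length + 1) + 1 by simp,
      List.range_succ_eq_map, List.filter_cons]
  have htail : List.filter (fun i => sep.isPrefixOf (List.drop i (c :: rest)))
        ((List.range (rest.length + 1)).map Nat.succ) =
      ((List.range (rest.length + 1)).filter
        (fun i => sep.isPrefixOf (List.drop i rest))).map (· + 1) := by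
    rw [List.filter_map]
    have h2 : List.filter ((fun i => sep.isPrefixOf (List.drop i (c :: rest))) ∘ Nat.succ)
        (List.range (rest.length + 1)) =
        List.filter (fun i => sep.isPrefixOf (List.drop i rest)) (List.range (rest.length + 1)) := by
      apply List.filter_congr
      intro i _
      simp [Function.comp, Nat.succ_eq_add_one, List.drop_succ_cons]
    rw [h2]
  rw [htail]
  split_ifs <;> simp_all

-- greedy ignores elements below a lower bound already implied by its threshold
theorem pv_greedy_filter (L : Nat) (t : Nat) :
    ∀ (xs : List Nat) (t' : Nat), t ≤ t' →
      pvGreedy L xs t' = pvGreedy L (xs.filter (fun p => decide (t ≤ p))) t' := by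
  intro xs
  induction xs with
  | nil => intro t' _; rfl
  | cons p ps ih =>
    intro t' ht
    by_cases hp : t ≤ p
    · rw [pvGreedy, List.filter_cons_of_pos (by simpa using hp), pvGreedy]
      by_cases h2 : t' ≤ p
      · rw [if_pos h2, if_pos h2, ih (p + L) (by omega)]
      · rw [if_neg h2, if_neg h2, ih t' ht]
    · rw [pvGreedy, List.filter_cons_of_neg (by simpa using hp), if_neg (by omega), ih t' ht]

theorem pv_greedy_map_add (L t : Nat) :
    ∀ (xs : List Nat) (u : Nat),
      pvGreedy L (xs.map (· + t)) (u + t) = (pvGreedy L xs u).map (· + t) := by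
  intro xs
  induction xs with
  | nil => intro u; rfl
  | cons p ps ih =>
    intro u
    rw [List.map_cons, pvGreedy, pvGreedy]
    by_cases h : u ≤ p
    · rw [if_pos (by omega), if_pos h, List.map_cons,
          show p + t + L = (p + L) + t by omega, ih (p + L)]
    · rw [if_neg (by omega), if_neg h, ih u]

theorem pv_greedy_map_one_zero (L : Nat) (xs : List Nat) :
    pvGreedy L (xs.map (· + 1)) 0 = (pvGreedy L xs 0).map (· + 1) := by
  cases xs with
  | nil => rfl
  | cons p ps =>
    rw [List.map_cons, pvGreedy, pvGreedy, if_pos (by omega), if_pos (by omega), List.map_cons,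
        show p + 1 + L = (p + L) + 1 by omega, pv_greedy_map_add]

-- candidates at or beyond t are the candidates of the t-dropped suffix, shifted
theorem pv_cand_filter_shift (sep l : List Char) (t : Nat) (ht : t ≤ l.length) :
    (pvCand sep l).filter (fun p => decide (t ≤ p)) = (pvCand sep (l.drop t)).map (· + t) := by
  unfold pvCand
  rw [List.filter_filter,
      show l.length + 1 = t + ((l.drop t).length + 1) by simp [List.length_drop]; omega,
      List.range_add, List.filter_append]
  have h1 : (List.range t).filter (fun a => decide (t ≤ a) && sep.isPrefixOf (l.drop a)) = [] := by
    rw [List.filter_eq_nil_iff]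
    intro i hi
    simp at hi ⊢
    omega
  rw [h1, List.nil_append, List.filter_map]
  rw [show ((fun x => t + x) : Nat → Nat) = (fun x => x + t) by funext x; omega]
  congr 1
  apply List.filter_congr
  intro i _
  have hd : List.drop (i + t) l = List.drop i (List.drop t l) := by
    rw [List.drop_drop, Nat.add_comm]
  simp [hd]

theorem pv_greedy_ge (L : Nat) : ∀ (xs : List Nat) (t q : Nat), q ∈ pvGreedy L xs t → t ≤ q := by
  intro xs
  induction xs with
  | nil => intro t q h; simp [pvGreedy] at h
  | cons p ps ih =>
    intro t q h
    rw [pvGreedy] at h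
    split_ifs at h with h1
    · rcases List.mem_cons.1 h with h2 | h2
      · omega
      · have := ih _ _ h2; omega
    · exact ih _ _ h

theorem pv_greedy_mem (L : Nat) : ∀ (xs : List Nat) (t q : Nat), q ∈ pvGreedy L xs t → q ∈ xs := by
  intro xs
  induction xs with
  | nil => intro t q h; simp [pvGreedy] at h
  | cons p ps ih =>
    intro t q h
    rw [pvGreedy] at h
    split_ifs at h with h1
    · rcases List.mem_cons.1 h with h2 | h2
      · simp [h2]
      · exact List.mem_cons_of_mem _ (ih _ _ h2)
    · exact List.mem_cons_of_mem _ (ih _ _ h)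

theorem pv_greedy_pairwise (L : Nat) : ∀ (xs : List Nat) (t : Nat),
    List.Pairwise (fun a b => a + L ≤ b) (pvGreedy L xs t) := by
  intro xs
  induction xs with
  | nil => intro t; simp [pvGreedy]
  | cons p ps ih =>
    intro t
    rw [pvGreedy]
    split_ifs with h1
    · rw [List.pairwise_cons]
      exact ⟨fun q hq => pv_greedy_ge L ps (p + L) q hq, ih (p + L)⟩
    · exact ih t

theorem pv_cand_mem (sep l : List Char) (q : Nat) (h : q ∈ pvCand sep l) :
    sep.isPrefixOf (l.drop q) ∧ q + sep.length ≤ l.length := by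
  unfold pvCand at h
  rw [List.mem_filter, List.mem_range] at h
  refine ⟨h.2, ?_⟩
  have := (List.isPrefixOf_iff_prefix.1 h.2).length_le
  simp [List.length_drop] at this
  omega

-- a slice starting at a match position decomposes as sep ++ the slice past the separator
theorem pv_prefix_slice (sep l : List Char) (a b : Nat)
    (hp : sep.isPrefixOf (l.drop a)) (hab : a + sep.length ≤ b) :
    (l.drop a).take (b - a) = sep ++ (l.drop (a + sep.length)).take (b - (a + sep.length)) := by
  obtain ⟨u, hu⟩ := List.isPrefixOf_iff_prefix.1 hp
  have hu2 : u = l.drop (a + sep.length) := by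
    have := congrArg (List.drop sep.length) hu
    rw [List.drop_append_of_le_length (by omega), List.drop_drop] at this
    simpa [Nat.add_comm, List.drop_of_length_le] using this
  rw [← hu, List.take_append, List.take_of_length_le (by omega), hu2]
  congr 2
  omega

-- slices over boundary pairs shifted by t are slices of the t-dropped suffix
theorem pv_shift_slices (l : List Char) (t : Nat) (as bs : List Nat) :
    ((as.map (· + t)).zip (bs.map (· + t))).map
        (fun ab => (l.drop ab.1).take (ab.2 - ab.1)) =
      (as.zip bs).map (fun ab => ((l.drop t).drop ab.1).take (ab.2 - ab.1)) := by
  rw [List.zip_map, List.map_map]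
  apply List.map_congr_left
  intro ab _
  simp only [Function.comp, Prod.map]
  rw [List.drop_drop, Nat.add_comm t ab.1]
  congr 1
  omega

-- a cut-started slice equals sep ++ the slice past the separator, boundary pair by boundary pair
theorem pv_hdr_tail (sep l : List Char) :
    ∀ (cs : List Nat), (∀ p ∈ cs, sep.isPrefixOf (l.drop p) ∧ p + sep.length ≤ l.length) →
      List.Pairwise (fun a b => a + sep.length ≤ b) cs →
      (cs.zip (cs.tail ++ [l.length])).map (fun ab => (l.drop ab.1).take (ab.2 - ab.1)) =
        ((cs.map (· + sep.length)).zip (cs.tail ++ [l.length])).map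
          (fun ab => sep ++ (l.drop ab.1).take (ab.2 - ab.1)) := by
  intro cs
  induction cs with
  | nil => intro _ _; rfl
  | cons c cs' ih =>
    intro hall hpw
    rcases List.pairwise_cons.1 hpw with ⟨hhead, htail⟩
    obtain ⟨hp, hb⟩ := hall c (List.mem_cons_self)
    cases cs' with
    | nil =>
      simp only [List.tail_cons, List.nil_append, List.map_cons, List.map_nil,
        List.zip_cons_cons, List.zip_nil_right]
      rw [pv_prefix_slice sep l c l.length hp hb]
    | cons d ds =>
      have hcd : c + sep.length ≤ d := hhead d (List.mem_cons_self)
      simp only [List.tail_cons, List.cons_append, List.map_cons, List.zip_cons_cons]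
      rw [pv_prefix_slice sep l c d hp hcd]
      congr 1
      have := ih (fun p hp2 => hall p (List.mem_cons_of_mem _ hp2)) htail
      rw [List.map_cons] at this
      simpa only [List.tail_cons] using this

-- B's cut positions carve content into exactly A's split chunks
theorem pv_step2 (sep : List Char) (hsep : sep ≠ []) :
    ∀ (l : List Char),
      pvChunks sep.length l (pvGreedy sep.length (pvCand sep l) 0) = pvSplitRec sep l := by
  have hL : 1 ≤ sep.length := by
    cases sep with | nil => exact absurd rfl hsep | cons a b => simp
  intro l
  induction l using pvSplitRec.induct sep with
  | case1 =>
    rw [pv_cand_short sep [] (by simpa using hL)]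
    simp [pvChunks, pvGreedy, pvSplitRec]
  | case2 c rest hpre ih =>
    have hlen : sep.length ≤ (c :: rest).length := by
      have := (List.isPrefixOf_iff_prefix.1 hpre).length_le
      simpa using this
    have hdrop : (c :: rest).drop sep.length = rest.drop (sep.length - 1) := by
      cases sep with | nil => exact absurd rfl hsep | cons a b => simp
    -- the greedy cuts of l are 0 followed by the shifted cuts of the suffix past sep
    have hc : pvGreedy sep.length (pvCand sep (c :: rest)) 0
        = 0 :: (pvGreedy sep.length (pvCand sep ((c :: rest).drop sep.length)) 0).map
            (· + sep.length) := by
      rw [pv_cand_cons, if_pos hpre]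
      show pvGreedy sep.length (0 :: (pvCand sep rest).map (· + 1)) 0 = _
      rw [pvGreedy, if_pos (by omega), Nat.zero_add]
      congr 1
      rw [pv_greedy_filter sep.length sep.length _ sep.length (le_refl _)]
      have h0 : ((pvCand sep rest).map (· + 1)).filter (fun p => decide (sep.length ≤ p))
          = (pvCand sep (c :: rest)).filter (fun p => decide (sep.length ≤ p)) := by
        rw [pv_cand_cons, if_pos hpre]
        show _ = List.filter _ (0 :: _)
        rw [List.filter_cons_of_neg (by simp; omega)]
        rfl
      rw [h0, pv_cand_filter_shift sep _ sep.length hlen]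
      have := pv_greedy_map_add sep.length sep.length
        (pvCand sep ((c :: rest).drop sep.length)) 0
      simpa using this
    rw [hc]
    -- unfold one chunk on each side and shift the rest
    rw [pvSplitRec]
    simp only [hpre, if_true]
    unfold pvChunks
    simp only [List.map_cons, List.cons_append, List.zip_cons_cons, List.map_cons,
      Nat.zero_add, Nat.sub_zero, List.drop_zero, List.take_zero]
    congr 1
    have hsplit : (pvGreedy sep.length (pvCand sep ((c :: rest).drop sep.length)) 0).map
          (· + sep.length) ++ [(c :: rest).length]
        = ((pvGreedy sep.length (pvCand sep ((c :: rest).drop sep.length)) 0)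
            ++ [(c :: rest).length - sep.length]).map (· + sep.length) := by
      rw [List.map_append, List.map_cons, List.map_nil]
      congr 2
      omega
    have hstarts : (sep.length :: ((pvGreedy sep.length (pvCand sep ((c :: rest).drop sep.length))
          0).map (· + sep.length)).map (· + sep.length))
        = ((0 :: (pvGreedy sep.length (pvCand sep ((c :: rest).drop sep.length)) 0).map
            (· + sep.length)).map (· + sep.length)) := by
      simp
    rw [hsplit, hstarts, pv_shift_slices (c :: rest) sep.length]
    rw [← hdrop] at ih
    rw [← hdrop, ← ih]
    unfold pvChunks
    simp only [List.length_drop]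
  | case3 c rest hp hnil ih =>
    exact absurd hnil (pvSplitRec_ne_nil sep rest)
  | case4 c rest hpre h t hht ih =>
    have hc : pvGreedy sep.length (pvCand sep (c :: rest)) 0
        = (pvGreedy sep.length (pvCand sep rest) 0).map (· + 1) := by
      rw [pv_cand_cons, if_neg hpre, List.nil_append, pv_greedy_map_one_zero]
    rw [hc, pvSplitRec]
    simp only [hpre, if_false, Bool.false_eq_true, hht]
    rw [hht] at ih
    cases hds : pvGreedy sep.length (pvCand sep rest) 0 with
    | nil =>
      rw [hds] at ih
      have hih : [rest] = h :: t := by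
        rw [← ih]
        simp [pvChunks, List.take_of_length_le]
      obtain ⟨hh, ht2⟩ := List.cons_eq_cons.1 hih
      subst hh; subst ht2
      simp [pvChunks, List.take_of_length_le]
    | cons d ds =>
      rw [hds] at ih
      unfold pvChunks at ih ⊢
      simp only [List.map_cons, List.cons_append, List.zip_cons_cons, List.map_cons,
        Nat.sub_zero, List.drop_zero] at ih ⊢
      obtain ⟨hh, ht2⟩ := List.cons_eq_cons.1 ih
      rw [List.cons_eq_cons]
      constructor
      · rw [List.take_succ_cons, hh]
      · rw [← ht2]
        have hs2 : (d + 1 + sep.length) :: ((ds.map (· + 1)).map (· + sep.length))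
            = (((d + sep.length) :: ds.map (· + sep.length)).map (· + 1)) := by
          simp only [List.map_cons, List.map_map]
          rw [List.cons_eq_cons]
          constructor
          · omega
          · congr 1
            funext x
            simp only [Function.comp]
            omega
        have he2 : ds.map (· + 1) ++ [(c :: rest).length]
            = ((ds ++ [rest.length]).map (· + 1)) := by
          simp
        rw [hs2, he2, pv_shift_slices (c :: rest) 1]
        rfl

theorem pv_startswith_eq (a b : List Char) : PySem.Chars.startswith a b = b.isPrefixOf a := by
  rw [Bool.eq_iff_iff, PySem.Chars.startswith_iff, List.isPrefixOf_iff_prefix]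

-- the ported candidate scan computes pvCand, cast to Int
theorem pv_cand_port (l sep : List Char) :
    (PySem.List.pyRange 0 ((l.length : Int) - (sep.length : Int) + 1) 1).filter
        (fun i => PySem.Chars.startswith (l.drop i.toNat) sep) =
      (pvCand sep l).map (fun k : Nat => (k : Int)) := by
  rw [PySem.List.pyRange_one, List.filter_map]
  have hpred : ∀ k : Nat, ((fun i : Int => PySem.Chars.startswith (l.drop i.toNat) sep) ∘
      (fun k : Nat => (0 : Int) + k)) k = sep.isPrefixOf (l.drop k) := by
    intro k
    simp [pv_startswith_eq]
  rw [List.filter_congr (fun k _ => hpred k)]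
  have hfn : ((fun k : Nat => (0 : Int) + k)) = (fun k : Nat => (k : Int)) := by
    funext k; omega
  rw [hfn]
  congr 1
  unfold pvCand
  rcases Nat.lt_or_ge l.length sep.length with hlt | hge
  · have h0 : (((l.length : Int) - (sep.length : Int) + 1) - 0).toNat = 0 ∨
        (((l.length : Int) - (sep.length : Int) + 1) - 0).toNat = 1 := by omega
    have hshort := pv_cand_short sep l hlt
    unfold pvCand at hshort
    rcases h0 with h0 | h0
    · rw [h0, hshort]; rfl
    · rw [h0]
      apply (pv_filter_range_ext _ 1 (l.length + 1) (by omega) ?_).symm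
      intro i h1 h2
      rw [← Bool.not_eq_true]
      intro hp
      have := (List.isPrefixOf_iff_prefix.1 hp).length_le
      simp [List.length_drop] at this
      omega
  · have hK : (((l.length : Int) - (sep.length : Int) + 1) - 0).toNat
        = l.length - sep.length + 1 := by omega
    rw [hK]
    apply (pv_filter_range_ext _ (l.length - sep.length + 1) (l.length + 1) (by omega) ?_).symm
    intro i h1 h2
    rw [← Bool.not_eq_true]
    intro hp
    have := (List.isPrefixOf_iff_prefix.1 hp).length_le
    simp [List.length_drop] at this
    omega

-- the ported greedy foldl computes pvGreedy, cast to Int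
theorem pv_foldl_greedy (L : Nat) :
    ∀ (xs : List Nat) (t : Nat) (acc : List Int),
      (((xs.map (fun k : Nat => (k : Int))).foldl
          (fun st p => if st.1 ≤ p then (p + (L : Int), st.2 ++ [p]) else st)
          (((t : Nat) : Int), acc))).2
        = acc ++ (pvGreedy L xs t).map (fun k : Nat => (k : Int)) := by
  intro xs
  induction xs with
  | nil => intro t acc; simp [pvGreedy]
  | cons p ps ih =>
    intro t acc
    rw [List.map_cons, List.foldl_cons, pvGreedy]
    have hc1 : ((((t : Nat) : Int), acc).1 ≤ (p : Int)) ↔ (t ≤ p) := by simp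
    by_cases h : t ≤ p
    · rw [if_pos (hc1.mpr h), if_pos h]
      have hc : ((p : Int) + (L : Int)) = (((p + L : Nat) : Int)) := by push_cast; ring
      rw [hc, ih (p + L) (acc ++ [(p : Int)])]
      simp
    · rw [if_neg (fun hx => h (hc1.mp hx)), if_neg h, ih t acc]

-- the two ports agree on every nonempty separator
theorem pv_main (content sep : List Char) (hsep : sep ≠ []) :
    pvAChars content sep = pvBChars content sep := by
  have hne : sep.isEmpty = false := by simp [hsep]
  unfold pvAChars pvBChars
  rw [if_neg hsep]
  simp only [PySem.Chars.split?, hne, Bool.false_eq_true, if_false]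
  rw [pv_splitOn_eq sep hsep content]
  rw [pv_cand_port content sep]
  have hfold := pv_foldl_greedy sep.length (pvCand sep content) 0 []
  simp only [Nat.cast_zero, List.nil_append] at hfold
  rw [hfold]
  set cuts := pvGreedy sep.length (pvCand sep content) 0 with hcuts
  have hvalid : ∀ p ∈ cuts, sep.isPrefixOf (content.drop p) ∧ p + sep.length ≤ content.length :=
    fun p hp => pv_cand_mem sep content p (pv_greedy_mem sep.length _ 0 p hp)
  have hpw : List.Pairwise (fun a b => a + sep.length ≤ b) cuts :=
    pv_greedy_pairwise sep.length _ 0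
  by_cases hh : PySem.Chars.startswith sep ['\n', '#']
  · -- header branch: the port keeps the separator inside the slice; pv_hdr_tail moves it out
    simp only [hh, if_true]
    rw [pv_chunksA]
    have hkeep : (cuts.map (fun k : Nat => (k : Int))).map
        (fun p => p + (sep.length : Int) - (sep.length : Int)) =
        cuts.map (fun k : Nat => (k : Int)) := by
      simp
    rw [hkeep]
    have hslices : (((0 : Int) :: cuts.map (fun k : Nat => (k : Int))).zip
          (cuts.map (fun k : Nat => (k : Int)) ++ [(content.length : Int)])).map
          (fun ab => PySem.Chars.strip (PySem.List.slice content (some ab.1) (some ab.2)))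
        = (pvDeco sep true true (pvChunks sep.length content cuts)).map PySem.Chars.strip := by
      have hz : ((0 : Int) :: cuts.map (fun k : Nat => (k : Int))).zip
            (cuts.map (fun k : Nat => (k : Int)) ++ [(content.length : Int)])
          = ((0 :: cuts).zip (cuts ++ [content.length])).map
              (Prod.map (fun k : Nat => (k : Int)) (fun k : Nat => (k : Int))) := by
        rw [← List.zip_map]
        simp
      rw [hz, List.map_map]
      have hmc : List.map ((fun ab => PySem.Chars.strip
            (PySem.List.slice content (some ab.1) (some ab.2))) ∘
            (Prod.map (fun k : Nat => (k : Int)) (fun k : Nat => (k : Int))))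
            ((0 :: cuts).zip (cuts ++ [content.length]))
          = List.map (PySem.Chars.strip ∘
              (fun ab : Nat × Nat => (content.drop ab.1).take (ab.2 - ab.1)))
              ((0 :: cuts).zip (cuts ++ [content.length])) := by
        apply List.map_congr_left
        intro ab _
        simp [Function.comp, Prod.map, PySem.List.slice_natCast]
      rw [hmc, ← List.map_map]
      congr 1
      -- raw header slices = decorated plain chunks
      cases hcs : cuts with
      | nil => simp [pvChunks, pvDeco]
      | cons c cs' =>
        unfold pvChunks
        simp only [List.zip_cons_cons, List.map_cons, List.cons_append, pvDeco,
          Nat.sub_zero, List.drop_zero]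
        rw [List.cons_eq_cons]
        refine ⟨rfl, ?_⟩
        have hvt : ∀ p ∈ c :: cs', sep.isPrefixOf (content.drop p) ∧
            p + sep.length ≤ content.length := by rw [← hcs]; exact hvalid
        have hpt : List.Pairwise (fun a b => a + sep.length ≤ b) (c :: cs') := by
          rw [← hcs]; exact hpw
        have := pv_hdr_tail sep content (c :: cs') hvt hpt
        simp only [List.tail_cons] at this
        rw [this, pv_deco_header_tail]
        rw [List.map_cons, List.map_map]
        rfl
    rw [hslices, pv_step2 sep hsep content]
    rw [List.filter_map]
    rfl
  · -- plain branch: boundaries already start past the separator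
    simp only [hh, if_false, Bool.false_eq_true]
    have hkeep : (cuts.map (fun k : Nat => (k : Int))).map
        (fun p => p + (sep.length : Int) - 0) =
        (cuts.map (· + sep.length)).map (fun k : Nat => (k : Int)) := by
      simp only [List.map_map]
      apply List.map_congr_left
      intro p _
      simp only [Function.comp]
      push_cast
      ring
    rw [hkeep]
    have hslices : (((0 : Int) :: (cuts.map (· + sep.length)).map (fun k : Nat => (k : Int))).zip
          (cuts.map (fun k : Nat => (k : Int)) ++ [(content.length : Int)])).map
          (fun ab => PySem.Chars.strip (PySem.List.slice content (some ab.1) (some ab.2)))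
        = (pvChunks sep.length content cuts).map PySem.Chars.strip := by
      have hz : ((0 : Int) :: (cuts.map (· + sep.length)).map (fun k : Nat => (k : Int))).zip
            (cuts.map (fun k : Nat => (k : Int)) ++ [(content.length : Int)])
          = ((0 :: cuts.map (· + sep.length)).zip (cuts ++ [content.length])).map
              (Prod.map (fun k : Nat => (k : Int)) (fun k : Nat => (k : Int))) := by
        rw [← List.zip_map]
        simp
      rw [hz, List.map_map]
      have hmc : List.map ((fun ab => PySem.Chars.strip
            (PySem.List.slice content (some ab.1) (some ab.2))) ∘
            (Prod.map (fun k : Nat => (k : Int)) (fun k : Nat => (k : Int))))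
            ((0 :: cuts.map (· + sep.length)).zip (cuts ++ [content.length]))
          = List.map (PySem.Chars.strip ∘
              (fun ab : Nat × Nat => (content.drop ab.1).take (ab.2 - ab.1)))
              ((0 :: cuts.map (· + sep.length)).zip (cuts ++ [content.length])) := by
        apply List.map_congr_left
        intro ab _
        simp [Function.comp, Prod.map, PySem.List.slice_natCast]
      rw [hmc, ← List.map_map]
      rfl
    rw [hslices, pv_step2 sep hsep content]
    rw [List.filter_map]
    rfl

-- ===== VERDICT (by name: the statement is the Claim_ definition above) =====
theorem split_by_separator_py_spec : Claim_equal_split_by_separator_py := by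
  intro content separator _hdom hpre
  unfold Spec_split_by_separator_py split_by_separator_py split_by_separator_py_alt
  have hsep : separator.toList ≠ [] := by
    intro h
    apply hpre
    have := congrArg String.ofList h
    simpa using this
  rw [pv_main content.toList separator.toList hsep]
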